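-- pv_equiv track=rewrite | github.com/carreirafernando/gerador-de-CPF | main.py | saida_formatada
-- ===== SOURCE A (Python) =====
-- def saida_formatada(entrada):
--     cpf = []
--     for indice, valor in enumerate(entrada):
--         if indice in [2, 5]:
--             cpf.append(f'{valor}.')
--         elif indice == 8:
--             cpf.append(f'{valor}-')
--         else:
--             cpf.append(valor)
--     return cpf
-- ===== SOURCE B (Python) =====
-- def saida_formatada(entrada):
--     cpf = list(entrada)
--     for i, sep in [(2, '.'), (5, '.'), (8, '-')]:
--         if i < len(cpf):
--             cpf[i] = f'{cpf[i]}{sep}'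
--     return cpf
-- ===== Notes on version B (the rewrite author's own statement) =====
-- stated objective: simpler
-- what changed: B copies the input once and then patches only the three fixed separator positions (2, 5, 8), instead of branching on the index of every element while rebuilding the list.
import Mathlib
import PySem

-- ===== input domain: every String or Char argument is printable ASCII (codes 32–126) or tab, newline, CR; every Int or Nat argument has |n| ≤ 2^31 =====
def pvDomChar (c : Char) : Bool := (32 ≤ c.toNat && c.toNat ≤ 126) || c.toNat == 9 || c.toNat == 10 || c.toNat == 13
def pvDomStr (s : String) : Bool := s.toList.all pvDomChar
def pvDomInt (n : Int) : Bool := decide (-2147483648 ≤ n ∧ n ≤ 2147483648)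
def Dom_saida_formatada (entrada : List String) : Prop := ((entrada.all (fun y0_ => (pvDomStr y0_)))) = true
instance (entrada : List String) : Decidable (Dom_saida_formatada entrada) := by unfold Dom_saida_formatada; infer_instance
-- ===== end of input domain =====

-- B copies the input once and then patches only the three fixed separator positions; simpler decomposition, same O(n) cost.


-- ===== PORT A =====
-- for indice, valor in enumerate(entrada): branch on indice, append
def saida_formatada (entrada : List String) : List String :=
  (PySem.List.enumerate entrada 0).foldl
    (fun cpf p =>
      if p.1 = 2 ∨ p.1 = 5 then cpf ++ [p.2 ++ "."]
      else if p.1 = 8 then cpf ++ [p.2 ++ "-"]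
      else cpf ++ [p.2]) []

-- ===== PORT B =====
-- cpf[i] = cpf[i] + sep, guarded by i < len(cpf)
def pvPatch (cpf : List String) (p : Nat × String) : List String :=
  if h : p.1 < cpf.length then cpf.set p.1 (cpf[p.1] ++ p.2) else cpf

def saida_formatada_alt (entrada : List String) : List String :=
  [(2, "."), (5, "."), (8, "-")].foldl pvPatch entrada

-- ===== PRECONDITION & SPEC =====
def Spec_saida_formatada (entrada : List String) (out : List String) : Prop := out = saida_formatada_alt entrada
instance (entrada : List String) (out : List String) : Decidable (Spec_saida_formatada entrada out) := by unfold Spec_saida_formatada; infer_instance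

-- ===== CLAIM (what is proved, stated in full; the proofs are below) =====
def Claim_equal_saida_formatada : Prop := ∀ (entrada : List String), Dom_saida_formatada entrada → Spec_saida_formatada entrada (saida_formatada entrada)

-- ===== LEMMAS AND PROOFS =====

-- the per-element value A appends
def pvG (p : Int × String) : String :=
  if p.1 = 2 ∨ p.1 = 5 then p.2 ++ "."
  else if p.1 = 8 then p.2 ++ "-"
  else p.2

theorem saida_formatada_eq_map (entrada : List String) :
    saida_formatada entrada = (PySem.List.enumerate entrada 0).map pvG := by
  unfold saida_formatada
  have h : (fun (cpf : List String) (p : Int × String) =>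
      if p.1 = 2 ∨ p.1 = 5 then cpf ++ [p.2 ++ "."]
      else if p.1 = 8 then cpf ++ [p.2 ++ "-"]
      else cpf ++ [p.2]) = fun cpf p => cpf ++ [pvG p] := by
    funext cpf p
    unfold pvG
    split_ifs <;> rfl
  rw [h, PySem.List.foldl_append_singleton_eq_map]
  simp

theorem pvPatch_getElem? (cpf : List String) (p : Nat × String) (k : Nat) :
    (pvPatch cpf p)[k]? = if k = p.1 then cpf[k]?.map (· ++ p.2) else cpf[k]? := by
  rcases eq_or_ne k p.1 with rfl | hk
  · rw [if_pos rfl]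
    unfold pvPatch
    split_ifs with h
    · simp [List.getElem?_set, h, List.getElem?_eq_getElem h]
    · rw [List.getElem?_eq_none (by omega)]; rfl
  · rw [if_neg hk]
    unfold pvPatch
    split_ifs with h
    · simp [Ne.symm hk]
    · rfl

theorem saida_formatada_spec' (entrada : List String) :
    saida_formatada entrada = saida_formatada_alt entrada := by
  rw [saida_formatada_eq_map]
  apply List.ext_getElem?
  intro k
  have halt : saida_formatada_alt entrada =
      pvPatch (pvPatch (pvPatch entrada (2, ".")) (5, ".")) (8, "-") := rfl
  rw [halt, pvPatch_getElem?, pvPatch_getElem?, pvPatch_getElem?]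
  rw [List.getElem?_map, PySem.List.getElem?_enumerate]
  rcases Nat.lt_or_ge k entrada.length with hk | hk
  · have e : entrada[k]? = some entrada[k] := List.getElem?_eq_getElem hk
    by_cases h2 : k = 2
    · subst h2; simp [e, pvG]
    by_cases h5 : k = 5
    · subst h5; simp [e, pvG]
    by_cases h8 : k = 8
    · subst h8; simp [e, pvG]
    have h2' : (k : Int) ≠ 2 := by omega
    have h5' : (k : Int) ≠ 5 := by omega
    have h8' : (k : Int) ≠ 8 := by omega
    simp [e, pvG, h2, h5, h8, h2', h5', h8']
  · have e : entrada[k]? = none := List.getElem?_eq_none hk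
    rw [e]
    split_ifs <;> rfl

-- ===== VERDICT (by name: the statement is the Claim_ definition above) =====
theorem saida_formatada_spec : Claim_equal_saida_formatada := by
  intro entrada _
  unfold Spec_saida_formatada
  exact saida_formatada_spec' entrada
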